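-- pv_equiv track=rewrite | github.com/ajschumacher/dor | dor/dor.py | entities_from_triples
-- ===== SOURCE A (Python) =====
-- id_prop_name = '_id'
--
-- def entities_from_triples(triples):
--     keyed_entities = {}
--     for triple in triples:
--         entity = keyed_entities.setdefault(triple[0],
--                                            {id_prop_name: triple[0]})
--         entity[triple[1]] = triple[2]
--     for entity_id, entity in keyed_entities.items():
--         yield entity
-- ===== SOURCE B (Python) =====
-- id_prop_name = '_id'
--
-- def entities_from_triples(triples):
--     # Two-pass: first group (prop, value) pairs by subject in first-appearance
--     # order, then build each entity dict by replaying its pairs in order.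
--     groups = {}
--     for triple in triples:
--         groups[triple[0]] = groups.get(triple[0], []) + [(triple[1], triple[2])]
--     for key, pairs in groups.items():
--         entity = {id_prop_name: key}
--         for prop, value in pairs:
--             entity[prop] = value
--         yield entity
-- ===== Notes on version B (the rewrite author's own statement) =====
-- stated objective: alternative
-- what changed: Replaces A's single pass that mutates nested entity dicts via setdefault with a two-pass grouping: a flat multimap from subject to its (prop, value) pairs is built first, then each entity dict is constructed by replaying its pairs in order.
import Mathlib
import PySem

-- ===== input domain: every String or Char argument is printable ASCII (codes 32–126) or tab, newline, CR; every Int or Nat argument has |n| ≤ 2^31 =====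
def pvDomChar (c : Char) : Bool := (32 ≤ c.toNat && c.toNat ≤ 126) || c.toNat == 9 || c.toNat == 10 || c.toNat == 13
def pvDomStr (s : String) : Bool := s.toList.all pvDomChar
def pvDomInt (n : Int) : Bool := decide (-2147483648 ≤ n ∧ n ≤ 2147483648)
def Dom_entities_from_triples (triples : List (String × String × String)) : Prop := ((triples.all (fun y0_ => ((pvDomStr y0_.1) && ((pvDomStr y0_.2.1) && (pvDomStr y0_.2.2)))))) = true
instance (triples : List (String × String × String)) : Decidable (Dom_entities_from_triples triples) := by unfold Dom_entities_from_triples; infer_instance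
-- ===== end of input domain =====

-- B builds a flat subject → (prop, value)-pairs multimap first, then replays each
-- pair list to build the entity dict; A mutates nested entity dicts in one pass.

-- ===== PORT A =====
-- one loop iteration of A: setdefault the entity, then entity[triple[1]] = triple[2]
def pvStepA (d : PySem.Dict String (PySem.Dict String String))
    (t : String × String × String) : PySem.Dict String (PySem.Dict String String) :=
  let d' := d.setdefault t.1 (PySem.Dict.ofList [("_id", t.1)])
  let entity := d'.getD t.1 PySem.Dict.empty   -- setdefault guarantees the key is present
  d'.insert t.1 (entity.insert t.2.1 t.2.2)

def entities_from_triples (triples : List (String × String × String)) : List (List (String × String)) :=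
  ((triples.foldl pvStepA PySem.Dict.empty).items).map (fun kv => kv.2.items)

-- ===== PORT B =====
-- one grouping iteration of B: groups[triple[0]] = groups.get(triple[0], []) + [(triple[1], triple[2])]
def pvStepB (g : PySem.Dict String (List (String × String)))
    (t : String × String × String) : PySem.Dict String (List (String × String)) :=
  g.insert t.1 (g.getD t.1 [] ++ [(t.2.1, t.2.2)])

-- B's second pass for one key: entity = {'_id': key}; for prop, value in pairs: entity[prop] = value
def pvReplay (k : String) (ps : List (String × String)) : PySem.Dict String String :=
  ps.foldl (fun e pv => e.insert pv.1 pv.2) (PySem.Dict.ofList [("_id", k)])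

def entities_from_triples_alt (triples : List (String × String × String)) : List (List (String × String)) :=
  ((triples.foldl pvStepB PySem.Dict.empty).items).map (fun kp => (pvReplay kp.1 kp.2).items)

-- ===== PRECONDITION & SPEC =====
def Spec_entities_from_triples (triples : List (String × String × String)) (out : List (List (String × String))) : Prop := out = entities_from_triples_alt triples
instance (triples : List (String × String × String)) (out : List (List (String × String))) : Decidable (Spec_entities_from_triples triples out) := by unfold Spec_entities_from_triples; infer_instance

-- ===== CLAIM (what is proved, stated in full; the proofs are below) =====
def Claim_equal_entities_from_triples : Prop := ∀ (triples : List (String × String × String)), Dom_entities_from_triples triples → Spec_entities_from_triples triples (entities_from_triples triples)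

-- ===== LEMMAS AND PROOFS =====

-- the relation the two loops maintain: A's dict is B's multimap with each pair list replayed
def pvRel (d : PySem.Dict String (PySem.Dict String String))
    (g : PySem.Dict String (List (String × String))) : Prop :=
  d.items = g.items.map (fun kp => (kp.1, pvReplay kp.1 kp.2))

theorem pvKeys_eq {d g} (h : pvRel d g) : d.keys = g.keys := by
  unfold pvRel at h
  simp [PySem.Dict.keys, h, List.map_map, Function.comp]

theorem pvReplay_append (k : String) (ps : List (String × String)) (p v : String) :
    pvReplay k (ps ++ [(p, v)]) = (pvReplay k ps).insert p v := by
  simp [pvReplay, List.foldl_append]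

theorem pvStep_rel (d : PySem.Dict String (PySem.Dict String String))
    (g : PySem.Dict String (List (String × String)))
    (hnd : d.keys.Nodup) (hng : g.keys.Nodup) (h : pvRel d g)
    (t : String × String × String) : pvRel (pvStepA d t) (pvStepB g t) := by
  obtain ⟨k, p, v⟩ := t
  have hkeys := pvKeys_eq h
  have hcont : d.contains k = g.contains k := by
    rw [PySem.Dict.contains_eq_decide_mem_keys, PySem.Dict.contains_eq_decide_mem_keys, hkeys]
  by_cases hc : g.contains k = true
  · -- key already present in both
    obtain ⟨ps, hps⟩ : ∃ ps, g.get? k = some ps := by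
      have := PySem.Dict.contains_eq_isSome_get? g k
      rw [hc] at this
      exact Option.isSome_iff_exists.mp this.symm
    have hmem : (k, ps) ∈ g.items := PySem.Dict.mem_items_of_get?_eq_some g hps
    have hmemd : (k, pvReplay k ps) ∈ d.items := by
      rw [h]; exact List.mem_map_of_mem hmem
    have hgd : d.getD k PySem.Dict.empty = pvReplay k ps :=
      PySem.Dict.getD_of_mem_items d hmemd hnd _
    have hgg : g.getD k [] = ps := PySem.Dict.getD_of_mem_items g hmem hng _
    have hcd : d.contains k = true := hcont ▸ hc
    simp only [pvStepA, pvStepB, pvRel]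
    rw [PySem.Dict.setdefault_of_contains d _ hcd]
    rw [PySem.Dict.items_insert_of_contains _ _ hcd,
        PySem.Dict.items_insert_of_contains _ _ hc, h, hgd, hgg,
        List.map_map, List.map_map]
    refine List.map_congr_left (fun q hq => ?_)
    simp only [Function.comp]
    by_cases hqk : q.1 == k
    · simp [hqk, pvReplay_append]
    · simp [hqk]
  · -- fresh key: both append
    have hcg : g.contains k = false := by simpa using hc
    have hcd : d.contains k = false := by rw [hcont]; exact hcg
    simp only [pvStepA, pvStepB, pvRel]
    rw [PySem.Dict.setdefault_of_not_contains d _ hcd]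
    rw [PySem.Dict.getD_insert_self, PySem.Dict.insert_insert_self]
    rw [PySem.Dict.items_insert_of_not_contains _ _ hcd,
        PySem.Dict.items_insert_of_not_contains _ _ hcg, h, List.map_append]
    rw [PySem.Dict.getD_of_not_contains g _ hcg]
    simp [pvReplay]

theorem pvLoop_rel (triples : List (String × String × String))
    (d : PySem.Dict String (PySem.Dict String String))
    (g : PySem.Dict String (List (String × String)))
    (hnd : d.keys.Nodup) (hng : g.keys.Nodup) (h : pvRel d g) :
    pvRel (triples.foldl pvStepA d) (triples.foldl pvStepB g) := by
  induction triples generalizing d g with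
  | nil => exact h
  | cons t ts ih =>
    refine ih _ _ ?_ ?_ (pvStep_rel d g hnd hng h t)
    · simp only [pvStepA]
      exact PySem.Dict.nodup_keys_insert _ _ _ (by
        rcases hd : d.contains t.1 with _ | _
        · rw [PySem.Dict.setdefault_of_not_contains d _ hd]
          exact PySem.Dict.nodup_keys_insert _ _ _ hnd
        · rw [PySem.Dict.setdefault_of_contains d _ hd]; exact hnd)
    · exact PySem.Dict.nodup_keys_insert _ _ _ hng

-- ===== VERDICT (by name: the statement is the Claim_ definition above) =====
theorem entities_from_triples_spec : Claim_equal_entities_from_triples := by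
  intro triples _
  unfold Spec_entities_from_triples entities_from_triples entities_from_triples_alt
  have h := pvLoop_rel triples PySem.Dict.empty PySem.Dict.empty
    (by simp [PySem.Dict.keys_empty]) (by simp [PySem.Dict.keys_empty]) (by unfold pvRel; rfl)
  rw [h, List.map_map]
  rfl
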